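-- pv_equiv track=rewrite | github.com/TeeKay-FourTwentyOne/math | ramsey-book-graphs/paley_gf49.py | primitive_root_mod
-- ===== SOURCE A (Python) =====
-- import sys, os, json, math
--
-- def primitive_root_mod(m):
--     """Find a primitive root mod m."""
--     phi_m = m
--     factors_m = []
--     temp = m
--     for p in range(2, int(temp**0.5) + 2):
--         if temp % p == 0:
--             factors_m.append(p)
--             phi_m = phi_m * (p - 1) // p
--             while temp % p == 0:
--                 temp //= p
--     if temp > 1:
--         factors_m.append(temp)
--         phi_m = phi_m * (temp - 1) // temp
--
--     phi_factors = []
--     temp_phi = phi_m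
--     for p in range(2, int(temp_phi**0.5) + 2):
--         if temp_phi % p == 0:
--             phi_factors.append(p)
--             while temp_phi % p == 0:
--                 temp_phi //= p
--     if temp_phi > 1:
--         phi_factors.append(temp_phi)
--
--     for g in range(2, m):
--         if math.gcd(g, m) != 1:
--             continue
--         ok = True
--         for p in phi_factors:
--             if pow(g, phi_m // p, m) == 1:
--                 ok = False
--                 break
--         if ok:
--             return g, phi_m
--     return None, phi_m
-- ===== SOURCE B (Python) =====
-- import math
--
-- def primitive_root_mod(m):
--     """Find a primitive root mod m."""
--     # totient by trial division (same computation as before, so phi_m matches exactly)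
--     phi_m = m
--     temp = m
--     for p in range(2, int(temp**0.5) + 2):
--         if temp % p == 0:
--             phi_m = phi_m * (p - 1) // p
--             while temp % p == 0:
--                 temp //= p
--     if temp > 1:
--         phi_m = phi_m * (temp - 1) // temp
--     # instead of factoring phi_m: enumerate its proper divisors and keep the
--     # divisibility-maximal ones; g is primitive iff g^d != 1 for each of those
--     divs = []
--     d = 1
--     while d * d <= phi_m:
--         if phi_m % d == 0:
--             divs.append(d)
--             divs.append(phi_m // d)
--         d += 1
--     proper = [x for x in divs if x < phi_m]
--     tops = [x for x in proper if not any(x < e and e % x == 0 for e in proper)]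
--     for g in range(2, m):
--         if math.gcd(g, m) != 1:
--             continue
--         if all(pow(g, x, m) != 1 for x in tops):
--             return g, phi_m
--     return None, phi_m
-- ===== Notes on version B (the rewrite author's own statement) =====
-- stated objective: alternative
-- what changed: The second factorization (prime factors of phi_m) is removed: B instead enumerates all proper divisors of phi_m and filters the divisibility-maximal ones (which are exactly the phi_m//p), then tests candidates g against those exponents.
import Mathlib
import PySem

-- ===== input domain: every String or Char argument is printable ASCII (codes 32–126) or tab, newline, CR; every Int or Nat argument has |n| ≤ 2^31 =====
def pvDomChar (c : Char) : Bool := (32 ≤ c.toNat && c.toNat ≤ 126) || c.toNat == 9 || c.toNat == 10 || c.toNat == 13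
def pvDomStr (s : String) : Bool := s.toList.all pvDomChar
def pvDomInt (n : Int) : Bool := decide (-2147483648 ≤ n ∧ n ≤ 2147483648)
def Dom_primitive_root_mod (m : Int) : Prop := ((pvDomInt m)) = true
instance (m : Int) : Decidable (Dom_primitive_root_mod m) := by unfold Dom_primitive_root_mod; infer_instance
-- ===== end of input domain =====

-- B drops A's second factorization: it enumerates the proper divisors of phi_m and keeps the
-- divisibility-maximal ones (exactly the phi_m//p) as the exponents to test (objective: alternative).

-- ===== PORT A =====

-- pow(g, e, m): CPython's 3-argument pow, i.e. binary exponentiation with a reduction after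
-- every multiplication (exact for the nonnegative exponents and positive moduli the ports use;
-- PySem.Int.powMod computes the full power first, which is not evaluable at this input scale)
def pvPowMod (g : Int) (e : Nat) (m : Int) : Int :=
  if e = 0 then PySem.Int.mod 1 m
  else
    let h := pvPowMod g (e / 2) m
    let h2 := PySem.Int.mod (h * h) m
    if e % 2 = 1 then PySem.Int.mod (h2 * g) m else h2
termination_by e
decreasing_by exact Nat.div_lt_self (by omega) (by omega)

-- while temp % p == 0: temp //= p   (fuel-counted structural recursion; the callers pass
-- fuel = temp.toNat, which always suffices, so this computes exactly the Python while loop)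
def pvDivOut (p : Int) : Nat → Int → Int
  | 0, t => t
  | fuel + 1, t =>
    if 2 ≤ p ∧ 0 < t ∧ PySem.Int.mod t p = 0 then pvDivOut p fuel (PySem.Int.floordiv t p)
    else t

-- body of A's first loop: state (factors_m, phi_m, temp)
def pvStep1 (s : List Int × Int × Int) (p : Int) : List Int × Int × Int :=
  if PySem.Int.mod s.2.2 p = 0 then
    (s.1 ++ [p], PySem.Int.floordiv (s.2.1 * (p - 1)) p, pvDivOut p s.2.2.toNat s.2.2)
  else s

-- body of A's second loop: state (phi_factors, temp_phi)
def pvStep2 (s : List Int × Int) (p : Int) : List Int × Int :=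
  if PySem.Int.mod s.2 p = 0 then (s.1 ++ [p], pvDivOut p s.2.toNat s.2) else s

-- for g in range(2, m): return the first g with gcd(g,m)==1 passing the prime-exponent tests
-- (a direct recursion, so that range(2, m) is never materialized;
--  pow's exponent phi//p is nonnegative on every admitted input, hence the .toNat)
def pvFindA (m phi : Int) (pf : List Int) : Nat → Int → Option Int
  | 0, _ => none
  | fuel + 1, g =>
    if g < m then
      (if Int.gcd g m == 1 &&
          pf.all (fun p => pvPowMod g (PySem.Int.floordiv phi p).toNat m != 1) then some g
       else pvFindA m phi pf fuel (g + 1))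
    else none

def primitive_root_mod (m : Int) : Option Int × Int :=
  -- int(temp**0.5) is ported as Nat.sqrt: exact for 0 ≤ temp ≤ 2^31 (CPython's float sqrt is
  -- correctly rounded there); Pre_ excludes m < 0, where Python raises TypeError on (temp)**0.5
  let s1 := (PySem.List.pyRange 2 ((Nat.sqrt m.toNat : Int) + 2) 1).foldl pvStep1 ([], m, m)
  let phi : Int := if s1.2.2 > 1 then PySem.Int.floordiv (s1.2.1 * (s1.2.2 - 1)) s1.2.2 else s1.2.1
  let s2 := (PySem.List.pyRange 2 ((Nat.sqrt phi.toNat : Int) + 2) 1).foldl pvStep2 ([], phi)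
  let pf : List Int := if s2.2 > 1 then s2.1 ++ [s2.2] else s2.1
  match pvFindA m phi pf (m - 2).toNat 2 with
  | some g => (some g, phi)
  | none => (none, phi)

-- ===== PORT B =====

-- body of B's totient loop: state (phi_m, temp)
def pvStepB (s : Int × Int) (p : Int) : Int × Int :=
  if PySem.Int.mod s.2 p = 0 then (PySem.Int.floordiv (s.1 * (p - 1)) p, pvDivOut p s.2.toNat s.2) else s

-- while d * d <= phi: collect d and phi // d when d divides phi  (fuel-counted structural
-- recursion; the caller passes fuel = (phi + 1).toNat, which always suffices since d ≤ phi
-- while the loop runs, so this computes exactly the Python while loop)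
def pvDivsLoop (phi : Int) : Nat → Int → List Int → List Int
  | 0, _, acc => acc
  | fuel + 1, d, acc =>
    if 0 < d ∧ d * d ≤ phi then
      pvDivsLoop phi fuel (d + 1)
        (if PySem.Int.mod phi d = 0 then acc ++ [d, PySem.Int.floordiv phi d] else acc)
    else acc

-- B's candidate loop: first g coprime to m with g^x % m != 1 for every maximal proper divisor x
def pvFindB (m phi : Int) (tops : List Int) : Nat → Int → Option Int
  | 0, _ => none
  | fuel + 1, g =>
    if g < m then
      (if Int.gcd g m == 1 &&
          tops.all (fun x => pvPowMod g x.toNat m != 1) then some g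
       else pvFindB m phi tops fuel (g + 1))
    else none

def primitive_root_mod_alt (m : Int) : Option Int × Int :=
  -- same totient computation as A's first loop (int(temp**0.5) ported as Nat.sqrt, exact on 0 ≤ temp ≤ 2^31)
  let s1 := (PySem.List.pyRange 2 ((Nat.sqrt m.toNat : Int) + 2) 1).foldl pvStepB (m, m)
  let phi : Int := if s1.2 > 1 then PySem.Int.floordiv (s1.1 * (s1.2 - 1)) s1.2 else s1.1
  let divs := pvDivsLoop phi (phi + 1).toNat 1 []
  let proper := divs.filter (fun x => x < phi)
  let tops := proper.filter (fun x => !(proper.any (fun e => x < e && PySem.Int.mod e x == 0)))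
  match pvFindB m phi tops (m - 2).toNat 2 with
  | some g => (some g, phi)
  | none => (none, phi)

-- ===== PRECONDITION & SPEC =====
-- Pre_ excludes m < 0, where Python's (temp)**0.5 is complex and int(...) raises TypeError.
def Pre_primitive_root_mod (m : Int) : Prop := 0 ≤ m
instance (m : Int) : Decidable (Pre_primitive_root_mod m) := by unfold Pre_primitive_root_mod; infer_instance
def pvWitness_primitive_root_mod : Int := 7

def Spec_primitive_root_mod (m : Int) (out : Option Int × Int) : Prop := out = primitive_root_mod_alt m
instance (m : Int) (out : Option Int × Int) : Decidable (Spec_primitive_root_mod m out) := by unfold Spec_primitive_root_mod; infer_instance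

-- ===== CLAIM (what is proved, stated in full; the proofs are below) =====
def Claim_equal_primitive_root_mod : Prop := ∀ (m : Int), Dom_primitive_root_mod m → Pre_primitive_root_mod m → Spec_primitive_root_mod m (primitive_root_mod m)

-- ===== LEMMAS AND PROOFS =====

theorem pvDivOut_spec_aux (p : Int) (n : Nat) : ∀ (t : Int), t.toNat ≤ n → 2 ≤ p → 0 < t →
    ∃ (k : Nat) (r : Int), pvDivOut p n t = r ∧ 0 < r ∧ t = p ^ k * r ∧ ¬ p ∣ r := by
  induction n with
  | zero => intro t h1 _ h3; omega
  | succ n ih =>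
    intro t h1 hp ht
    by_cases hm : PySem.Int.mod t p = 0
    · have hdvd : p ∣ t := (PySem.Int.mod_eq_zero_iff_dvd t p).mp hm
      have hfd : PySem.Int.floordiv t p = t / p := PySem.Int.floordiv_eq_ediv_of_pos (by omega)
      have hlt : t / p < t := by
        apply Int.ediv_lt_of_lt_mul (by omega); nlinarith
      have hpos : 0 < t / p := by
        apply Int.ediv_pos_of_pos_of_dvd ht (by omega) hdvd
      obtain ⟨k, r, h4, h5, h6, h7⟩ := ih (t / p) (by omega) (by omega) hpos
      refine ⟨k + 1, r, ?_, h5, ?_, h7⟩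
      · show (if 2 ≤ p ∧ 0 < t ∧ PySem.Int.mod t p = 0 then pvDivOut p n (PySem.Int.floordiv t p)
          else t) = r
        rw [if_pos ⟨hp, ht, hm⟩, hfd, h4]
      · have hc : t / p * p = t := Int.ediv_mul_cancel hdvd
        rw [pow_succ]; nlinarith [h6]
    · refine ⟨0, t, ?_, ht, by ring, ?_⟩
      · show (if 2 ≤ p ∧ 0 < t ∧ PySem.Int.mod t p = 0 then pvDivOut p n (PySem.Int.floordiv t p)
          else t) = t
        rw [if_neg (by tauto)]
      · intro hd; exact hm ((PySem.Int.mod_eq_zero_iff_dvd t p).mpr hd)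

theorem pvDivOut_spec (p t : Int) (hp : 2 ≤ p) (ht : 0 < t) :
    ∃ (k : Nat) (r : Int), pvDivOut p t.toNat t = r ∧ 0 < r ∧ t = p ^ k * r ∧ ¬ p ∣ r :=
  pvDivOut_spec_aux p t.toNat t le_rfl hp ht

-- the projection: A's first loop and B's first loop compute the same (phi, temp)
theorem pv_phi_proj (l : List Int) : ∀ (fs : List Int) (s : Int × Int),
    (List.foldl pvStep1 (fs, s) l).2 = List.foldl pvStepB s l := by
  induction l with
  | nil => intro fs s; rfl
  | cons p l ih =>
    intro fs s
    show (List.foldl pvStep1 (pvStep1 (fs, s) p) l).2 = List.foldl pvStepB (pvStepB s p) l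
    rcases s with ⟨phi, temp⟩
    by_cases h : PySem.Int.mod temp p = 0
    · simp only [pvStep1, pvStepB, h, if_pos]
      exact ih _ _
    · simp only [pvStep1, pvStepB, h, if_neg, ite_false]
      exact ih _ _

-- light invariant of the first loop: phi and temp stay positive and temp divides phi
theorem pv_inv1 (l : List Int) : ∀ (s : Int × Int), (∀ x ∈ l, 2 ≤ x) →
    0 < s.1 → 0 < s.2 → s.2 ∣ s.1 →
    0 < (List.foldl pvStepB s l).1 ∧ 0 < (List.foldl pvStepB s l).2 ∧
      (List.foldl pvStepB s l).2 ∣ (List.foldl pvStepB s l).1 := by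
  induction l with
  | nil => intro s _ h1 h2 h3; exact ⟨h1, h2, h3⟩
  | cons p l ih =>
    intro ⟨phi, temp⟩ hl h1 h2 h3
    dsimp only at h1 h2 h3
    have hp : 2 ≤ p := hl p (by simp)
    show _ ∧ _ ∧ _
    rw [List.foldl_cons]
    by_cases h : PySem.Int.mod temp p = 0
    · obtain ⟨k, r, hr, hr0, hteq, hnd⟩ := pvDivOut_spec p temp hp h2
      have hpd : p ∣ temp := (PySem.Int.mod_eq_zero_iff_dvd temp p).mp h
      obtain ⟨c, hc⟩ := h3
      have hk : 1 ≤ k := by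
        by_contra hk0
        have : k = 0 := by omega
        subst this; simp at hteq; subst hteq; exact hnd hpd
      have hc0 : 0 < c := by nlinarith
      have hphi' : PySem.Int.floordiv (phi * (p - 1)) p = p ^ (k-1) * r * c * (p - 1) := by
        rw [PySem.Int.floordiv_eq_ediv_of_pos (by omega)]
        have : phi * (p - 1) = p * (p ^ (k-1) * r * c * (p - 1)) := by
          rw [hc, hteq]
          have : p ^ k = p * p ^ (k - 1) := by
            conv_lhs => rw [show k = 1 + (k-1) by omega]
            rw [pow_add, pow_one]
          rw [this]; ring
        rw [this, Int.mul_ediv_cancel_left _ (by omega)]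
      have hstep : pvStepB (phi, temp) p = (p ^ (k-1) * r * c * (p - 1), r) := by
        simp only [pvStepB, h, if_pos, hphi', hr]
      rw [hstep]
      apply ih
      · intro x hx; exact hl x (by simp [hx])
      · have : (0:Int) < p ^ (k-1) := pow_pos (by omega) _
        dsimp only
        exact mul_pos (mul_pos (mul_pos this hr0) hc0) (by omega)
      · exact hr0
      · exact ⟨p ^ (k-1) * c * (p-1), by dsimp only; ring⟩
    · have hstep : pvStepB (phi, temp) p = (phi, temp) := by
        simp only [pvStepB, h, if_neg, ite_false]
      rw [hstep]
      exact ih _ (fun x hx => hl x (by simp [hx])) h1 h2 h3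

theorem pv_loop2_go (φn : Nat) (N : Int) (cnt : Nat) :
    ∀ (a : Int) (fs : List Int) (t : Nat),
    (N - a).toNat ≤ cnt → 2 ≤ a → a ≤ N →
    0 < t → t ∣ φn →
    (∀ q : Nat, q.Prime → q ∣ t → a ≤ (q:Int)) →
    (∀ x, x ∈ fs ↔ ∃ q : Nat, x = (q:Int) ∧ q.Prime ∧ q ∣ φn ∧ (q:Int) < a) →
    (∀ q : Nat, q.Prime → q ∣ φn → a ≤ (q:Int) → q ∣ t) →
    ∃ (fs' : List Int) (t' : Nat),
      List.foldl pvStep2 (fs, (t:Int)) (PySem.List.pyRange a N 1) = (fs', (t':Int)) ∧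
      0 < t' ∧ t' ∣ φn ∧
      (∀ q : Nat, q.Prime → q ∣ t' → N ≤ (q:Int)) ∧
      (∀ x, x ∈ fs' ↔ ∃ q : Nat, x = (q:Int) ∧ q.Prime ∧ q ∣ φn ∧ (q:Int) < N) ∧
      (∀ q : Nat, q.Prime → q ∣ φn → N ≤ (q:Int) → q ∣ t') := by
  induction cnt with
  | zero =>
    intro a fs t hcnt ha2 haN ht htd hqt hfs hbig
    have : a = N := by omega
    subst this
    rw [PySem.List.pyRange_one_eq_nil le_rfl]
    exact ⟨fs, t, rfl, ht, htd, hqt, hfs, hbig⟩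
  | succ cnt ih =>
    intro a fs t hcnt ha2 haN ht htd hqt hfs hbig
    by_cases hlt : a < N
    · rw [PySem.List.pyRange_one_cons hlt, List.foldl_cons]
      set pn : Nat := a.toNat with hpn
      have hacast : (pn : Int) = a := by omega
      have hmod : PySem.Int.mod (t:Int) a = 0 ↔ pn ∣ t := by
        rw [PySem.Int.mod_eq_zero_iff_dvd, ← hacast, Int.natCast_dvd_natCast]
      by_cases hdvd : pn ∣ t
      · -- a divides temp: a is prime, gets appended, temp is divided out
        have hpprime : pn.Prime := by
          rw [Nat.prime_def_minFac]
          refine ⟨by omega, ?_⟩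
          have h1 : pn.minFac ∣ t := dvd_trans (Nat.minFac_dvd pn) hdvd
          have h2 : pn.minFac.Prime := Nat.minFac_prime (by omega)
          have h3 : a ≤ (pn.minFac : Int) := hqt _ h2 h1
          have h4 : pn.minFac ≤ pn := Nat.minFac_le (by omega)
          omega
        obtain ⟨k, r, hdo, hr0, hteq, hnd⟩ := pvDivOut_spec a t (by omega) (by omega)
        set rn : Nat := r.toNat with hrn
        have hrcast : (rn : Int) = r := by omega
        have hk1 : 1 ≤ k := by
          rcases Nat.eq_zero_or_pos k with hk | hk
          · exfalso; apply hnd; rw [hk, pow_zero, one_mul] at hteq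
            rw [← hteq, ← hacast, Int.natCast_dvd_natCast]; exact hdvd
          · exact hk
        have hrdvdt : rn ∣ t := by
          rw [← Int.natCast_dvd_natCast, hrcast]
          exact ⟨a ^ k, by rw [hteq]; ring⟩
        have hstep : pvStep2 (fs, (t:Int)) a = (fs ++ [a], (rn:Int)) := by
          simp only [pvStep2, hmod.mpr hdvd, if_pos, hdo, hrcast]
        rw [hstep]
        have hnotdvd : ¬ pn ∣ rn := by
          intro hc; apply hnd
          rw [← hrcast, ← hacast, Int.natCast_dvd_natCast]; exact hc
        apply ih (a+1) (fs ++ [a]) rn (by omega) (by omega) (by omega)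
          (by omega) (dvd_trans hrdvdt htd)
        · intro q hq hqr
          have h1 : q ∣ t := dvd_trans hqr hrdvdt
          have h2 : a ≤ (q:Int) := hqt q hq h1
          have h3 : q ≠ pn := by
            intro hc; subst hc; exact hnotdvd hqr
          omega
        · intro x
          simp only [List.mem_append, List.mem_singleton, hfs]
          constructor
          · rintro (⟨q, h1, h2, h3, h4⟩ | h1)
            · exact ⟨q, h1, h2, h3, by omega⟩
            · exact ⟨pn, by omega, hpprime, dvd_trans hdvd htd, by omega⟩
          · rintro ⟨q, h1, h2, h3, h4⟩
            by_cases hq : (q:Int) < a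
            · exact Or.inl ⟨q, h1, h2, h3, hq⟩
            · right; omega
        · intro q hq hqφ hle
          have h1 : q ∣ t := hbig q hq hqφ (by omega)
          -- q ≠ pn, q prime, q ∣ t = pn^k * rn → q ∣ rn
          have h2 : q ≠ pn := by omega
          have hcop : Nat.Coprime q (pn ^ k) :=
            Nat.Coprime.pow_right k ((Nat.coprime_primes hq hpprime).mpr h2)
          have hteq' : (t:Int) = ((pn ^ k : Nat) : Int) * r := by
            rw [hteq, ← hacast]; push_cast; ring
          have h3 : (q:Int) ∣ ((pn ^ k : Nat) : Int) * r := by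
            rw [← hteq']; exact Int.natCast_dvd_natCast.mpr h1
          have h5 : IsCoprime (q:Int) ((pn ^ k : Nat) : Int) := by
            rw [Int.isCoprime_iff_gcd_eq_one, Int.gcd_natCast_natCast]
            exact hcop
          have h6 : (q:Int) ∣ r := IsCoprime.dvd_of_dvd_mul_left h5 h3
          rw [← hrcast, Int.natCast_dvd_natCast] at h6
          exact h6
      · -- a does not divide temp
        have hstep : pvStep2 (fs, (t:Int)) a = (fs, (t:Int)) := by
          have : ¬ PySem.Int.mod (t:Int) a = 0 := fun hc => hdvd (hmod.mp hc)
          simp only [pvStep2, this, ite_false, if_false]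
        rw [hstep]
        apply ih (a+1) fs t (by omega) (by omega) (by omega) ht htd
        · intro q hq hqr
          have h1 := hqt q hq hqr
          have h2 : q ≠ pn := by intro hc; subst hc; exact hdvd hqr
          omega
        · intro x
          rw [hfs]
          constructor
          · rintro ⟨q, h1, h2, h3, h4⟩; exact ⟨q, h1, h2, h3, by omega⟩
          · rintro ⟨q, h1, h2, h3, h4⟩
            refine ⟨q, h1, h2, h3, ?_⟩
            by_contra hq
            have hqa : (q:Int) = a := by omega
            have : q ∣ t := hbig q h2 h3 (by omega)
            apply hdvd
            have : q = pn := by omega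
            subst this; assumption
        · intro q hq hqφ hle
          apply hbig q hq hqφ (by omega)
    · have : a = N := by omega
      subst this
      rw [PySem.List.pyRange_one_eq_nil le_rfl]
      exact ⟨fs, t, rfl, ht, htd, hqt, hfs, hbig⟩

theorem pv_pf_char (φn : Nat) (hφ : 0 < φn) :
    ∀ x, x ∈ (if (List.foldl pvStep2 ([], (φn:Int))
                  (PySem.List.pyRange 2 ((Nat.sqrt φn : Int) + 2) 1)).2 > 1
              then (List.foldl pvStep2 ([], (φn:Int))
                  (PySem.List.pyRange 2 ((Nat.sqrt φn : Int) + 2) 1)).1 ++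
                [(List.foldl pvStep2 ([], (φn:Int))
                  (PySem.List.pyRange 2 ((Nat.sqrt φn : Int) + 2) 1)).2]
              else (List.foldl pvStep2 ([], (φn:Int))
                  (PySem.List.pyRange 2 ((Nat.sqrt φn : Int) + 2) 1)).1) ↔
      ∃ q : Nat, x = (q:Int) ∧ q.Prime ∧ q ∣ φn := by
  intro x
  set N : Int := (Nat.sqrt φn : Int) + 2 with hN
  obtain ⟨fs', t', heq, ht0, htd, hqt, hfs, hbig⟩ :=
    pv_loop2_go φn N (N - 2).toNat 2 [] φn le_rfl (by omega) (by omega) hφ dvd_rfl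
      (by intro q hq _; exact_mod_cast hq.two_le)
      (by intro x; simp only [List.not_mem_nil, false_iff]
          rintro ⟨q, _, hq, _, h4⟩; have := hq.two_le; omega)
      (by intro q _ hqd _; exact hqd)
  rw [heq]
  dsimp only
  by_cases ht1 : (t' : Int) > 1
  · rw [if_pos ht1]
    have htprime : t'.Prime := by
      by_contra hnp
      have hmf : t'.minFac.Prime := Nat.minFac_prime (by omega)
      have h1 : t'.minFac ∣ t' := Nat.minFac_dvd t'
      have h2 : N ≤ (t'.minFac : Int) := hqt _ hmf h1
      have h3 : t'.minFac ^ 2 ≤ t' := Nat.minFac_sq_le_self (by omega) hnp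
      have h4 : t' ≤ φn := Nat.le_of_dvd hφ htd
      have h5 : t'.minFac ≤ Nat.sqrt φn := by
        rw [Nat.le_sqrt]
        calc t'.minFac * t'.minFac = t'.minFac ^ 2 := by ring
        _ ≤ t' := h3
        _ ≤ φn := h4
      omega
    simp only [List.mem_append, List.mem_singleton, hfs]
    constructor
    · rintro (⟨q, h1, h2, h3, _⟩ | h1)
      · exact ⟨q, h1, h2, h3⟩
      · exact ⟨t', h1, htprime, htd⟩
    · rintro ⟨q, h1, h2, h3⟩
      by_cases hq : (q:Int) < N
      · exact Or.inl ⟨q, h1, h2, h3, hq⟩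
      · right
        have h4 : q ∣ t' := hbig q h2 h3 (by omega)
        have h5 : q = t' := (Nat.prime_dvd_prime_iff_eq h2 htprime).mp h4
        rw [h1, h5]
  · rw [if_neg ht1]
    have ht1' : t' = 1 := by omega
    rw [hfs]
    constructor
    · rintro ⟨q, h1, h2, h3, _⟩; exact ⟨q, h1, h2, h3⟩
    · rintro ⟨q, h1, h2, h3⟩
      refine ⟨q, h1, h2, h3, ?_⟩
      by_contra hq
      have h4 : q ∣ t' := hbig q h2 h3 (by omega)
      rw [ht1'] at h4
      have h5 : q = 1 := Nat.dvd_one.mp h4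
      have := h2.two_le
      omega

theorem pv_divs_go (φn : Nat) (hφ : 0 < φn) (cnt : Nat) :
    ∀ (d : Nat) (acc : List Int), 0 < d → φn + 1 - d ≤ cnt →
    (∀ x, x ∈ acc ↔ ∃ e : Nat, x = (e:Int) ∧ e ∣ φn ∧ (e < d ∨ φn / e < d)) →
    ∀ x, x ∈ pvDivsLoop (φn:Int) cnt (d:Int) acc ↔ ∃ e : Nat, x = (e:Int) ∧ e ∣ φn := by
  induction cnt with
  | zero =>
    intro d acc hd hcnt hacc x
    -- fuel 0: the loop returns acc, and d > φn already
    show x ∈ acc ↔ _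
    rw [hacc]
    constructor
    · rintro ⟨e, h1, h2, _⟩; exact ⟨e, h1, h2⟩
    · rintro ⟨e, h1, h2⟩
      have he1 : 1 ≤ e := Nat.one_le_iff_ne_zero.mpr (by rintro rfl; simp at h2; omega)
      exact ⟨e, h1, h2, Or.inl (by have := Nat.le_of_dvd hφ h2; omega)⟩
  | succ cnt ih =>
    intro d acc hd hcnt hacc x
    by_cases hg : (d:Int) * (d:Int) ≤ (φn:Int)
    · rw [pvDivsLoop, if_pos ⟨by exact_mod_cast hd, hg⟩]
      have hdd : d * d ≤ φn := by exact_mod_cast hg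
      have hmod : PySem.Int.mod (φn:Int) (d:Int) = 0 ↔ d ∣ φn := by
        rw [PySem.Int.mod_eq_zero_iff_dvd, Int.natCast_dvd_natCast]
      have hstep : ((d:Int) + 1) = ((d+1 : Nat) : Int) := by push_cast; ring
      rw [hstep]
      by_cases hdvd : d ∣ φn
      · rw [if_pos (hmod.mpr hdvd)]
        rw [PySem.Int.floordiv_natCast]
        apply ih (d+1) _ (by omega) (by omega) _ x
        intro y
        simp only [List.mem_append, List.mem_cons, List.mem_singleton, List.not_mem_nil, or_false, hacc]
        constructor
        · rintro (⟨e, h1, h2, h3⟩ | h1 | h1)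
          · exact ⟨e, h1, h2, by omega⟩
          · exact ⟨d, h1, hdvd, Or.inl (by omega)⟩
          · refine ⟨φn / d, h1, Nat.div_dvd_of_dvd hdvd, Or.inr ?_⟩
            rw [Nat.div_div_self hdvd (by omega)]; omega
        · rintro ⟨e, h1, h2, h3⟩
          have he1 : 1 ≤ e := Nat.one_le_iff_ne_zero.mpr (by rintro rfl; simp at h2; omega)
          rcases h3 with h3 | h3
          · rcases Nat.lt_succ_iff_lt_or_eq.mp h3 with h4 | h4
            · exact Or.inl ⟨e, h1, h2, Or.inl h4⟩
            · subst h4; exact Or.inr (Or.inl h1)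
          · rcases Nat.lt_succ_iff_lt_or_eq.mp h3 with h4 | h4
            · exact Or.inl ⟨e, h1, h2, Or.inr h4⟩
            · right; right
              have h5 : φn / (φn / e) = e := Nat.div_div_self h2 (by omega)
              rw [h1, ← h4, h5]
      · rw [if_neg (fun hc => hdvd (hmod.mp hc))]
        apply ih (d+1) _ (by omega) (by omega) _ x
        intro y
        rw [hacc]
        constructor
        · rintro ⟨e, h1, h2, h3⟩; exact ⟨e, h1, h2, by omega⟩
        · rintro ⟨e, h1, h2, h3⟩
          have he1 : 1 ≤ e := Nat.one_le_iff_ne_zero.mpr (by rintro rfl; simp at h2; omega)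
          refine ⟨e, h1, h2, ?_⟩
          rcases h3 with h3 | h3
          · rcases Nat.lt_succ_iff_lt_or_eq.mp h3 with h4 | h4
            · exact Or.inl h4
            · exfalso; exact hdvd (h4 ▸ h2)
          · rcases Nat.lt_succ_iff_lt_or_eq.mp h3 with h4 | h4
            · exact Or.inr h4
            · exfalso
              apply hdvd
              rw [← h4]
              exact Nat.div_dvd_of_dvd h2
    · rw [pvDivsLoop, if_neg (by rintro ⟨_, h2⟩; omega)]
      rw [hacc]
      have hgt : φn < d * d := by
        have : (φn:Int) < (d:Int)*(d:Int) := by omega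
        exact_mod_cast this
      constructor
      · rintro ⟨e, h1, h2, _⟩; exact ⟨e, h1, h2⟩
      · rintro ⟨e, h1, h2⟩
        have he1 : 1 ≤ e := Nat.one_le_iff_ne_zero.mpr (by rintro rfl; simp at h2; omega)
        refine ⟨e, h1, h2, ?_⟩
        by_cases hee : e * e ≤ φn
        · left; by_contra hc; push_neg at hc; nlinarith
        · right
          push_neg at hee
          obtain ⟨c, hc⟩ := h2
          have hce : c = φn / e := by rw [hc, Nat.mul_div_cancel_left _ (by omega)]
          have hclt : c < e := by nlinarith
          by_contra hcge
          push_neg at hcge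
          rw [← hce] at hcge
          nlinarith

theorem pv_tops_char (φn : Nat) (hφ : 0 < φn) (divs : List Int)
    (hdivs : ∀ x, x ∈ divs ↔ ∃ e : Nat, x = (e:Int) ∧ e ∣ φn) :
    ∀ x, (x ∈ (divs.filter (fun x => x < (φn:Int))).filter
        (fun x => !((divs.filter (fun y => y < (φn:Int))).any
          (fun e => x < e && PySem.Int.mod e x == 0)))) ↔
      ∃ q : Nat, q.Prime ∧ q ∣ φn ∧ x = ((φn / q : Nat) : Int) := by
  intro x
  have hproper : ∀ y, (y ∈ divs.filter (fun x => x < (φn:Int))) ↔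
      ∃ e : Nat, y = (e:Int) ∧ e ∣ φn ∧ e < φn := by
    intro y
    rw [List.mem_filter]
    constructor
    · rintro ⟨h1, h2⟩
      obtain ⟨e, he1, he2⟩ := (hdivs y).mp h1
      refine ⟨e, he1, he2, ?_⟩
      rw [he1] at h2
      simp only [decide_eq_true_eq] at h2
      exact_mod_cast h2
    · rintro ⟨e, he1, he2, he3⟩
      exact ⟨(hdivs y).mpr ⟨e, he1, he2⟩, by rw [he1]; simp only [decide_eq_true_eq]; exact_mod_cast he3⟩
  rw [List.mem_filter]
  constructor
  · rintro ⟨h1, h2⟩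
    obtain ⟨e, he1, he2, he3⟩ := (hproper x).mp h1
    have he0 : 0 < e := Nat.pos_of_dvd_of_pos he2 hφ
    obtain ⟨c, hc⟩ := he2
    have hc2 : 2 ≤ c := by
      rcases Nat.lt_or_ge c 2 with h | h
      · interval_cases c <;> omega
      · exact h
    set q := c.minFac with hq
    have hqp : q.Prime := Nat.minFac_prime (by omega)
    have hqc : q ∣ c := Nat.minFac_dvd c
    have hqφ : q ∣ φn := hc ▸ Dvd.dvd.mul_left hqc e
    obtain ⟨c', hc'⟩ := hqc
    have hφeq : φn = q * (e * c') := by rw [hc, hc']; ring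
    have hediv : φn / q = e * c' := by rw [hφeq, Nat.mul_div_cancel_left _ hqp.pos]
    have hmem : ((e * c' : Nat) : Int) ∈ divs.filter (fun x => x < (φn:Int)) := by
      apply (hproper _).mpr
      refine ⟨e * c', rfl, ⟨q, by rw [hφeq]; ring⟩, ?_⟩
      have hc'0 : 0 < c' := by
        rcases Nat.eq_zero_or_pos c' with h | h
        · exfalso; rw [h, Nat.mul_zero] at hc'; omega
        · exact h
      have h2q := hqp.two_le
      nlinarith [hφeq]
    -- maximality: e divides e*c' and e*c' is a proper divisor, so e = e*c'
    have hnot := h2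
    simp only [Bool.not_eq_eq_eq_not, Bool.not_true, List.any_eq_false] at hnot
    have h3 := hnot _ hmem
    simp only [Bool.and_eq_true, decide_eq_true_eq, beq_iff_eq, not_and] at h3
    have hdvd' : PySem.Int.mod ((e * c' : Nat) : Int) x = 0 := by
      rw [he1, PySem.Int.mod_eq_zero_iff_dvd, Int.natCast_dvd_natCast]
      exact ⟨c', rfl⟩
    have h4 : ¬ x < ((e * c' : Nat) : Int) := by
      push_cast
      intro hlt
      exact h3 hlt (by push_cast at hdvd'; exact hdvd')
    have h5 : e = e * c' := by
      have : e ≤ e * c' := Nat.le_of_dvd (by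
        rcases Nat.eq_zero_or_pos (e * c') with h | h
        · exfalso; rw [h] at hφeq; omega
        · exact h) ⟨c', rfl⟩
      rw [he1] at h4
      have : (e:Int) ≥ ((e * c' : Nat) : Int) := by omega
      omega
    exact ⟨q, hqp, hqφ, by rw [he1, hediv, ← h5]⟩
  · rintro ⟨q, hqp, hqφ, hx⟩
    have hq2 := hqp.two_le
    obtain ⟨w, hw⟩ := hqφ
    have hwdiv : φn / q = w := by rw [hw, Nat.mul_div_cancel_left _ hqp.pos]
    have hw0 : 0 < w := by
      rcases Nat.eq_zero_or_pos w with h | h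
      · exfalso; rw [h, Nat.mul_zero] at hw; omega
      · exact h
    have hmem : x ∈ divs.filter (fun x => x < (φn:Int)) := by
      apply (hproper x).mpr
      refine ⟨φn / q, hx, Nat.div_dvd_of_dvd ⟨w, hw⟩, ?_⟩
      exact Nat.div_lt_self hφ hqp.one_lt
    refine ⟨hmem, ?_⟩
    simp only [Bool.not_eq_eq_eq_not, Bool.not_true, List.any_eq_false]
    intro y hy
    simp only [Bool.and_eq_true, decide_eq_true_eq, beq_iff_eq, not_and]
    intro hlt hmod
    obtain ⟨en, hy1, hy2, hy3⟩ := (hproper y).mp hy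
    exfalso
    -- y = en is a proper divisor of φn, a strict multiple of φn/q = w: impossible
    have hdw : w ∣ en := by
      rw [hy1, hx, hwdiv] at hmod
      rw [PySem.Int.mod_eq_zero_iff_dvd, Int.natCast_dvd_natCast] at hmod
      exact hmod
    obtain ⟨t, ht⟩ := hdw
    have hwlt : w < en := by
      rw [hx, hwdiv] at hlt; rw [hy1] at hlt; exact_mod_cast hlt
    have ht2 : 2 ≤ t := by nlinarith
    have htq : t ∣ q := by
      obtain ⟨u, hu⟩ := hy2
      have : q * w = t * w * u := by rw [← hw, hu, ht]; ring
      have hq' : q = t * u := by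
        have := Nat.eq_of_mul_eq_mul_right hw0 (by linarith [this] : q * w = (t * u) * w)
        exact this
      exact ⟨u, hq'⟩
    have htq' : t = q := by
      rcases (Nat.Prime.eq_one_or_self_of_dvd hqp t htq) with h | h
      · omega
      · exact h
    have hen : en = φn := by rw [ht, htq', hw, Nat.mul_comm]
    omega

-- the tail step ("if temp > 1") keeps phi positive
theorem pv_phi_pos (phi temp : Int) (h1 : 0 < phi) (h2 : 0 < temp) (h3 : temp ∣ phi) :
    0 < (if temp > 1 then PySem.Int.floordiv (phi * (temp - 1)) temp else phi) := by
  split_ifs with h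
  · obtain ⟨c, hc⟩ := h3
    have hc0 : 0 < c := by nlinarith
    have heq : phi * (temp - 1) = temp * (c * (temp - 1)) := by rw [hc]; ring
    rw [PySem.Int.floordiv_eq_ediv_of_pos h2, heq, Int.mul_ediv_cancel_left _ (by omega)]
    exact mul_pos hc0 (by omega)
  · exact h1

-- both candidate tests quantify over the same exponents: the phi//p for p prime dividing phi
theorem pv_all_eq (φn : Nat) (g m : Int) (pf tops : List Int)
    (hpf : ∀ x, x ∈ pf ↔ ∃ q : Nat, x = (q:Int) ∧ q.Prime ∧ q ∣ φn)
    (htops : ∀ x, x ∈ tops ↔ ∃ q : Nat, q.Prime ∧ q ∣ φn ∧ x = ((φn / q : Nat) : Int)) :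
    pf.all (fun p => pvPowMod g (PySem.Int.floordiv (φn:Int) p).toNat m != 1) =
      tops.all (fun x => pvPowMod g x.toNat m != 1) := by
  rw [Bool.eq_iff_iff, List.all_eq_true, List.all_eq_true]
  constructor
  · intro h x hx
    obtain ⟨q, hq1, hq2, hx'⟩ := (htops x).mp hx
    have := h (q:Int) ((hpf _).mpr ⟨q, rfl, hq1, hq2⟩)
    simp only [PySem.Int.floordiv_natCast] at this
    rw [hx']
    exact this
  · intro h p hp
    obtain ⟨q, rfl, hq1, hq2⟩ := (hpf p).mp hp
    simp only [PySem.Int.floordiv_natCast]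
    exact h _ ((htops _).mpr ⟨q, hq1, hq2, rfl⟩)

-- the two candidate loops agree when the two tests agree pointwise
theorem pv_find_congr (m phi phi' : Int) (pf tops : List Int)
    (h : ∀ g : Int, pf.all (fun p => pvPowMod g (PySem.Int.floordiv phi p).toNat m != 1) =
      tops.all (fun x => pvPowMod g x.toNat m != 1)) (cnt : Nat) :
    ∀ g : Int, pvFindA m phi pf cnt g = pvFindB m phi' tops cnt g := by
  induction cnt with
  | zero => intro g; rfl
  | succ cnt ih =>
    intro g
    rw [pvFindA, pvFindB, h g]
    by_cases hlt : g < m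
    · rw [if_pos hlt, if_pos hlt]
      by_cases hp : (Int.gcd g m == 1 &&
          tops.all (fun x => pvPowMod g x.toNat m != 1)) = true
      · rw [if_pos hp, if_pos hp]
      · rw [if_neg hp, if_neg hp, ih (g + 1)]
    · rw [if_neg hlt, if_neg hlt]

-- ===== VERDICT (by name: the statement is the Claim_ definition above) =====
theorem primitive_root_mod_spec : Claim_equal_primitive_root_mod := by
  intro m _ hm
  unfold Pre_primitive_root_mod at hm
  unfold Spec_primitive_root_mod
  simp only [primitive_root_mod, primitive_root_mod_alt]
  rw [pv_phi_proj]
  set l1 := PySem.List.pyRange 2 ((Nat.sqrt m.toNat : Int) + 2) 1 with hl1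
  set s1 := List.foldl pvStepB (m, m) l1 with hs1
  set φ : Int := (if s1.2 > 1 then PySem.Int.floordiv (s1.1 * (s1.2 - 1)) s1.2 else s1.1) with hφdef
  by_cases hm3 : m < 3
  · have h0 : (m - 2).toNat = 0 := by omega
    rw [h0]
    rfl
  · -- m ≥ 3: the candidate tests agree pointwise
    have hminv := pv_inv1 l1 (m, m)
      (by intro x hx; rw [hl1, PySem.List.mem_pyRange_one] at hx; omega)
      (by omega) (by omega) dvd_rfl
    have hφ0 : 0 < φ := pv_phi_pos s1.1 s1.2 hminv.1 hminv.2.1 hminv.2.2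
    set φn : Nat := φ.toNat with hφn
    have hcast : (φn : Int) = φ := by omega
    have hφn0 : 0 < φn := by omega
    -- characterization of A's phi_factors
    have hpf := pv_pf_char φn hφn0
    rw [hcast] at hpf
    -- characterization of B's divisor list and of tops
    have hdivs := pv_divs_go φn hφn0 (φn + 1) 1 [] (by omega) (by omega)
      (by intro x
          simp only [List.not_mem_nil, false_iff]
          rintro ⟨e, _, h2, h3⟩
          have he1 : 1 ≤ e := Nat.one_le_iff_ne_zero.mpr (by rintro rfl; simp at h2; omega)
          have : 1 ≤ φn / e := Nat.one_le_div_iff (by omega) |>.mpr (Nat.le_of_dvd hφn0 h2)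
          omega)
    rw [Nat.cast_one, hcast, show φn + 1 = (φ + 1).toNat from by omega] at hdivs
    have htops := pv_tops_char φn hφn0 (pvDivsLoop φ (φ + 1).toNat 1 []) hdivs
    rw [pv_find_congr m φ φ _ _ ?_ (m - 2).toNat 2]
    intro g
    have hall := pv_all_eq φn g m _ _ hpf htops
    rw [hcast] at hall
    exact hall
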